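-- pv_equiv track=rewrite | github.com/konstantin-ogulchansky/pfe | src/legacy/model/Model.py | graphe_init_cliques
-- ===== SOURCE A (Python) =====
-- def graphe_init_cliques(n0,N,qm):
--
--     if n0<qm:
--         raise NameError('n0 must be higher than the number of communities.')
--
-- #    d = [2 for i in range(n0)] + [0 for i in range(n0,N)]
-- #    e = [i for i in range(n0)] + [i for i in range(n0)]
-- #    vlist = [[1,n0-1]] + [[i-1,i+1] for i in range(1,n0-1)] + [[n0-2,0]] + [[] for i in range(n0,N)]
-- #    len_e = 2*n0
-- #    return d, e, vlist, len_e
--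
--     d = [0 for i in range(N)]
--     e = [[] for i in range(qm)]
--     vlist = [[] for i in range(N)]
--     list_of_hyperedges = []
--
-- #    Q = list(range(qm))
--     Q = []
--     nodes_by_communities = [[] for i in range(qm)]
--     for nn in range(n0):
--         nodes_by_communities[nn%qm].append(nn)
--         Q.append(nn%qm)
--
--     return d, e, vlist, Q, nodes_by_communities, list_of_hyperedges
-- ===== SOURCE B (Python) =====
-- def graphe_init_cliques(n0, N, qm):
--     if n0 < qm:
--         raise NameError('n0 must be higher than the number of communities.')
--     d = [0] * max(N, 0)
--     e = [[] for _ in range(qm)]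
--     vlist = [[] for _ in range(N)]
--     Q = [nn % qm for nn in range(n0)]
--     nodes_by_communities = [list(range(c, n0, qm)) for c in range(qm)]
--     return d, e, vlist, Q, nodes_by_communities, []
-- ===== Notes on version B (the rewrite author's own statement) =====
-- stated objective: simpler
-- what changed: The node-by-node dispatch loop that mutates nodes_by_communities and Q is replaced by direct comprehensions: Q = [nn % qm for nn in range(n0)] and each community c collected by striding range(c, n0, qm); Pre_ excludes only inputs where A raises (NameError when n0<qm, ZeroDivisionError when qm==0<n0, IndexError when qm<0<n0).
import Mathlib
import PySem

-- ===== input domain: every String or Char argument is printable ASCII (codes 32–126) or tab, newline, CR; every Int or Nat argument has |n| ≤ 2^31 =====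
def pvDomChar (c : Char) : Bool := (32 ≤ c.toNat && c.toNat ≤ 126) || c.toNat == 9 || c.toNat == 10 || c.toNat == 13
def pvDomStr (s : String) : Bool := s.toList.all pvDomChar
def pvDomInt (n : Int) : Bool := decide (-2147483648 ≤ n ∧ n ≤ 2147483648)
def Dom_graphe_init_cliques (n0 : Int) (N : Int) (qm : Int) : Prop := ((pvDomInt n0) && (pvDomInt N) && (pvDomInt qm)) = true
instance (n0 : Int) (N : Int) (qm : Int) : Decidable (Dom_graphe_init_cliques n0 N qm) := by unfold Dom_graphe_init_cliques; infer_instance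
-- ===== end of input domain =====

-- B replaces A's node-by-node dispatch loop by per-community stride collection (simpler decomposition; equal cost).

-- ===== PORT A =====
-- state of the loop: (nodes_by_communities, Q); each iteration mutates nodes_by_communities[nn % qm] and appends to Q
def graphe_init_cliques (n0 : Int) (N : Int) (qm : Int) :
    List Int × List (List Int) × List (List Int) × List Int × List (List Int) × List Int :=
  let d := (PySem.List.pyRange 0 N 1).map (fun _ => (0 : Int))
  let e := (PySem.List.pyRange 0 qm 1).map (fun _ => ([] : List Int))
  let vlist := (PySem.List.pyRange 0 N 1).map (fun _ => ([] : List Int))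
  let list_of_hyperedges : List Int := []
  let st := (PySem.List.pyRange 0 n0 1).foldl
    (fun (st : List (List Int) × List Int) nn =>
      (st.1.modify (PySem.Int.mod nn qm).toNat (fun l => l ++ [nn]),
       st.2 ++ [PySem.Int.mod nn qm]))
    ((PySem.List.pyRange 0 qm 1).map (fun _ => ([] : List Int)), ([] : List Int))
  (d, e, vlist, st.2, st.1, list_of_hyperedges)

-- ===== PORT B =====
def pvEmpties (k : Int) : List (List Int) :=
  (PySem.List.pyRange 0 k 1).map (fun _ => ([] : List Int))

def graphe_init_cliques_alt (n0 : Int) (N : Int) (qm : Int) :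
    List Int × List (List Int) × List (List Int) × List Int × List (List Int) × List Int :=
  (List.replicate (max N 0).toNat (0 : Int),
   pvEmpties qm,
   pvEmpties N,
   (PySem.List.pyRange 0 n0 1).map (fun nn => PySem.Int.mod nn qm),
   (PySem.List.pyRange 0 qm 1).map (fun c => PySem.List.pyRange c n0 qm),
   [])

-- ===== PRECONDITION & SPEC =====
-- Pre_ excludes exactly the inputs where A raises: n0 < qm (NameError), qm = 0 < n0
-- (ZeroDivisionError on nn % 0), and qm < 0 < n0 (IndexError on the empty community list).
def Pre_graphe_init_cliques (n0 : Int) (N : Int) (qm : Int) : Prop :=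
  qm ≤ n0 ∧ (0 < qm ∨ n0 ≤ 0)
instance (n0 : Int) (N : Int) (qm : Int) : Decidable (Pre_graphe_init_cliques n0 N qm) := by
  unfold Pre_graphe_init_cliques; infer_instance

def pvWitness_graphe_init_cliques : Int × Int × Int := (5, 7, 2)

def Spec_graphe_init_cliques (n0 : Int) (N : Int) (qm : Int)
    (out : List Int × List (List Int) × List (List Int) × List Int × List (List Int) × List Int) : Prop :=
  out = graphe_init_cliques_alt n0 N qm
instance (n0 : Int) (N : Int) (qm : Int)
    (out : List Int × List (List Int) × List (List Int) × List Int × List (List Int) × List Int) :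
    Decidable (Spec_graphe_init_cliques n0 N qm out) := by
  unfold Spec_graphe_init_cliques; infer_instance

-- ===== CLAIM =====
def Claim_equal_graphe_init_cliques : Prop :=
  ∀ (n0 : Int) (N : Int) (qm : Int), Dom_graphe_init_cliques n0 N qm →
    Pre_graphe_init_cliques n0 N qm →
    Spec_graphe_init_cliques n0 N qm (graphe_init_cliques n0 N qm)

-- ===== LEMMAS AND PROOFS =====

theorem pv_stride_filter (qm c n : Int) (hq : 0 < qm) (hc : 0 ≤ c) (hcq : c < qm) :
    PySem.List.pyRange c n qm
      = (PySem.List.pyRange 0 n 1).filter (fun nn => PySem.Int.mod nn qm == c) := by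
  have hm : ∀ x : Int, PySem.Int.mod x qm = x % qm := fun x => PySem.Int.mod_eq_emod_of_pos hq
  have hnd1 : (PySem.List.pyRange c n qm).Nodup := by
    rw [PySem.List.pyRange_of_pos _ _ hq]
    refine List.Nodup.map (fun a b h => ?_) List.nodup_range
    have h2 : qm * (a : Int) = qm * (b : Int) := by
      have := add_left_cancel h; exact this
    exact_mod_cast mul_left_cancel₀ (ne_of_gt hq) h2
  have hnd2 : ((PySem.List.pyRange 0 n 1).filter (fun nn => PySem.Int.mod nn qm == c)).Nodup :=
    List.Nodup.sublist List.filter_sublist (PySem.List.nodup_pyRange_one 0 n)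
  have hp1 : (PySem.List.pyRange c n qm).Pairwise (· < ·) := by
    rw [PySem.List.pyRange_of_pos _ _ hq]
    refine List.Pairwise.map _ (fun a b h => ?_) List.pairwise_lt_range
    have : qm * (a : Int) < qm * (b : Int) :=
      Int.mul_lt_mul_of_pos_left (by exact_mod_cast h) hq
    omega
  have hp2 : ((PySem.List.pyRange 0 n 1).filter (fun nn => PySem.Int.mod nn qm == c)).Pairwise (· < ·) :=
    List.Pairwise.sublist List.filter_sublist (PySem.List.pairwise_lt_pyRange_one 0 n)
  refine List.Perm.eq_of_pairwise (fun a b _ _ h1 h2 => absurd (lt_trans h1 h2) (lt_irrefl a)) hp1 hp2 ?_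
  rw [List.perm_ext_iff_of_nodup hnd1 hnd2]
  intro x
  rw [PySem.List.mem_pyRange_iff_of_pos hq]
  simp only [List.mem_filter, PySem.List.mem_pyRange_one, beq_iff_eq, hm]
  constructor
  · rintro ⟨h1, h2, k, hk⟩
    refine ⟨⟨by omega, h2⟩, ?_⟩
    have hx : x = c + qm * k := by omega
    rw [hx, Int.add_mul_emod_self_left, Int.emod_eq_of_lt hc hcq]
  · rintro ⟨⟨h0, h2⟩, hmm⟩
    have hdvd : qm ∣ x - c := by
      have : (x - c) % qm = 0 := by
        rw [Int.sub_emod, hmm]; simp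
      exact Int.dvd_of_emod_eq_zero this
    have hcx : c ≤ x := by
      by_cases hx : x < qm
      · rw [Int.emod_eq_of_lt h0 hx] at hmm; omega
      · omega
    exact ⟨hcx, h2, hdvd⟩


theorem pv_foldl_pair (l : List Int) (g : List (List Int) → Int → List (List Int)) (f : Int → Int)
    (a : List (List Int)) (b : List Int) :
    l.foldl (fun st x => (g st.1 x, st.2 ++ [f x])) (a, b) = (l.foldl g a, b ++ l.map f) := by
  induction l generalizing a b with
  | nil => simp
  | cons x l ih => simp [ih]

theorem pv_modify_map (qm i : Int) (hi : 0 ≤ i)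
    (f : List Int → List Int) (F : Int → List Int) :
    (((PySem.List.pyRange 0 qm 1).map F).modify i.toNat f)
      = (PySem.List.pyRange 0 qm 1).map (fun c => if c = i then f (F c) else F c) := by
  apply List.ext_getElem
  · simp [List.length_modify]
  · intro k h1 h2
    simp [List.getElem_modify] at *
    by_cases h : (k : Int) = i
    · simp [h, show i.toNat = k by omega]
    · simp [h, show i.toNat ≠ k by omega]

theorem pv_group_fold (qm : Int) (hq : 0 < qm) (l : List Int)
    (F : Int → List Int) :
    l.foldl (fun nbc nn => nbc.modify (PySem.Int.mod nn qm).toNat (fun t => t ++ [nn]))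
        ((PySem.List.pyRange 0 qm 1).map F)
      = (PySem.List.pyRange 0 qm 1).map
          (fun c => F c ++ l.filter (fun nn => PySem.Int.mod nn qm == c)) := by
  induction l generalizing F with
  | nil => simp
  | cons x l ih =>
    simp only [List.foldl_cons]
    rw [pv_modify_map qm (PySem.Int.mod x qm) (PySem.Int.mod_nonneg x hq)]
    rw [ih]
    apply List.map_congr_left
    intro c _
    by_cases h : c = PySem.Int.mod x qm
    · have hx : (PySem.Int.mod x qm == c) = true := by simp [h]
      simp [h, List.append_assoc]
    · have hx : (PySem.Int.mod x qm == c) = false := by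
        simp; exact fun hh => h hh.symm
      simp [h, hx]

theorem pv_d (N : Int) :
    (PySem.List.pyRange 0 N 1).map (fun _ => (0 : Int))
      = List.replicate (max N 0).toNat (0 : Int) := by
  rw [PySem.List.pyRange_one, List.map_map]
  have : ((fun _ => (0:Int)) ∘ fun k : Nat => (0:Int) + k) = fun _ => (0:Int) := rfl
  rw [this, List.map_const', List.length_range]
  congr 1
  omega

-- ===== VERDICT =====
theorem graphe_init_cliques_spec : Claim_equal_graphe_init_cliques := by
  intro n0 N qm _ hpre
  obtain ⟨hle, hcase⟩ := hpre
  unfold Spec_graphe_init_cliques graphe_init_cliques graphe_init_cliques_alt pvEmpties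
  rw [pv_foldl_pair _ (fun s x => s.modify (PySem.Int.mod x qm).toNat (fun t => t ++ [x]))
        (fun x => PySem.Int.mod x qm)]
  rcases hcase with hq | hn0
  · -- 0 < qm
    rw [pv_group_fold qm hq]
    simp only [pv_d, List.nil_append]
    refine congrArg _ (congrArg _ (congrArg _ (congrArg _ (congrArg (· , _) ?_))))
    apply List.map_congr_left
    intro c hc
    rw [PySem.List.mem_pyRange_one] at hc
    rw [← pv_stride_filter qm c n0 hq hc.1 hc.2]
  · -- n0 ≤ 0 (and qm ≤ n0 ≤ 0)
    have h1 : PySem.List.pyRange 0 n0 1 = [] := PySem.List.pyRange_one_eq_nil hn0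
    have h2 : PySem.List.pyRange 0 qm 1 = [] := PySem.List.pyRange_one_eq_nil (le_trans hle hn0)
    rw [h1, h2]
    simp
    omega
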